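-- pv_equiv track=rewrite | github.com/snsinfu/bit5 | test162-hypercube_embedding/main.py | hypercube
-- ===== SOURCE A (Python) =====
-- def hypercube(dimension):
--     """
--     Generate hypercube edges. Returns a list of pairs of joined vertices. Each
--     vertex is identified by its integral code.
--     """
--     edges = []
--     for n in range(dimension):
--         vertices = 2 ** n
--         new_edges = edges.copy()
--         new_edges += [(i + vertices, j + vertices) for i, j in edges]
--         new_edges += [(i, i + vertices) for i in range(vertices)]
--         edges = new_edges
--     return edges
-- ===== SOURCE B (Python) =====
-- def hypercube(dimension):
--     """
--     Generate hypercube edges. Returns a list of pairs of joined vertices. Each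
--     vertex is identified by its integral code.
--     """
--     edges = []
--     # Explicit task stack over offset subcubes, post-order: lower half-cube,
--     # upper half-cube, then the rungs joining them.
--     stack = [(dimension, 0, False)]
--     while stack:
--         n, offset, ready = stack.pop()
--         if n <= 0:
--             continue
--         half = 2 ** (n - 1)
--         if ready:
--             edges.extend(zip(range(offset, offset + half),
--                              range(offset + half, offset + half + half)))
--         else:
--             stack.append((n, offset, True))
--             stack.append((n - 1, offset + half, False))
--             stack.append((n - 1, offset, False))
--     return edges
-- ===== Notes on version B (the rewrite author's own statement) =====
-- stated objective: alternative
-- what changed: Replaced the loop that re-copies and shifts the whole edge list at every dimension by a divide-and-conquer traversal over offset subcubes that appends each edge to one shared output list exactly once, with no map/copy passes.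
import Mathlib
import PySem

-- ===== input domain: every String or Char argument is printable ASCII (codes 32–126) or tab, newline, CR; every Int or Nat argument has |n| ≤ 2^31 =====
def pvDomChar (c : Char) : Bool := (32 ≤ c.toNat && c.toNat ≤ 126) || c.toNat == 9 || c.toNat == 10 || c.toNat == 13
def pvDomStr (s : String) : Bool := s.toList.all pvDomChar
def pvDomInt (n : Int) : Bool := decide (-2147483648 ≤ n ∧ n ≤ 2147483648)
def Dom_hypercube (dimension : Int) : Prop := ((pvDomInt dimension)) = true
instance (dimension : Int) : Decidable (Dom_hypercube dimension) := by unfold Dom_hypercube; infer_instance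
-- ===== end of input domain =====

-- B replaces A's level-by-level rebuild of the edge list (copy + shifted copy + rungs)
-- by an explicit-stack post-order traversal of offset subcubes appending to one output list.

-- ===== PORT A =====
-- '2 ** n' with n drawn from range(dimension), hence n ≥ 0: '2 ^ n.toNat' is exact there.
def hypercube (dimension : Int) : List (Int × Int) :=
  (PySem.List.pyRange 0 dimension 1).foldl
    (fun edges n =>
      let vertices : Int := 2 ^ n.toNat
      edges ++ edges.map (fun p => (p.1 + vertices, p.2 + vertices))
        ++ (PySem.List.pyRange 0 vertices 1).map (fun i => (i, i + vertices)))
    []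

-- ===== PORT B =====
-- termination weight of one stack entry (proof device only; not part of B's data)
def hcW (e : Int × Int × Bool) : Nat := if e.2.2 then 1 else 3 * 2 ^ e.1.toNat - 2

-- every entry has positive weight (used by the loop's termination argument)
theorem hcW_pos (e : Int × Int × Bool) : 1 ≤ hcW e := by
  rcases e with ⟨n, off, r⟩
  have h1 : 1 ≤ 2 ^ n.toNat := Nat.one_le_two_pow
  simp only [hcW]; split <;> omega

-- the Python 'while stack:' loop; the list head is the stack top (Python pops the end);
-- '2 ** (n - 1)' is taken with n ≥ 1 on this branch; 'zip(range(..), range(..))' is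
-- List.zip of the two pyRanges.
def hcLoop (stack : List (Int × Int × Bool)) (edges : List (Int × Int)) : List (Int × Int) :=
  match stack with
  | [] => edges
  | (n, offset, ready) :: rest =>
    if n ≤ 0 then hcLoop rest edges
    else
      let half : Int := 2 ^ (n - 1).toNat
      if hready : ready then
        hcLoop rest (edges ++ (PySem.List.pyRange offset (offset + half) 1).zip
                               (PySem.List.pyRange (offset + half) (offset + half + half) 1))
      else
        hcLoop ((n - 1, offset, false) :: (n - 1, offset + half, false)
                  :: (n, offset, true) :: rest) edges
termination_by (stack.map hcW).sum
decreasing_by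
  · simp only [List.map_cons, List.sum_cons]
    have := hcW_pos (n, offset, ready)
    omega
  · simp only [List.map_cons, List.sum_cons]
    have := hcW_pos (n, offset, ready)
    omega
  · simp only [List.map_cons, List.sum_cons, hcW]
    rw [Bool.not_eq_true] at hready
    subst hready
    have hn2 : n.toNat = (n - 1).toNat + 1 := by omega
    rw [hn2, pow_succ]
    have h1 : 1 ≤ 2 ^ (n - 1).toNat := Nat.one_le_two_pow
    norm_num
    have hEq : n.toNat - 1 = (n - 1).toNat := by omega
    rw [hEq]
    omega

def hypercube_alt (dimension : Int) : List (Int × Int) := hcLoop [(dimension, 0, false)] []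

-- ===== PRECONDITION & SPEC =====
def Spec_hypercube (dimension : Int) (out : List (Int × Int)) : Prop := out = hypercube_alt dimension
instance (dimension : Int) (out : List (Int × Int)) : Decidable (Spec_hypercube dimension out) := by unfold Spec_hypercube; infer_instance

-- ===== CLAIM (what is proved, stated in full; the proofs are below) =====
def Claim_equal_hypercube : Prop := ∀ (dimension : Int), Dom_hypercube dimension → Spec_hypercube dimension (hypercube dimension)

-- ===== LEMMAS AND PROOFS =====
-- the rung block in a common normal form
def rungs (a h : Int) : List (Int × Int) :=
  (List.range h.toNat).map (fun (k : Nat) => ((a + k : Int), (a + h + k : Int)))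

theorem zip_pyRange_eq_rungs (a h : Int) :
    (PySem.List.pyRange a (a + h) 1).zip (PySem.List.pyRange (a + h) (a + h + h) 1)
      = rungs a h := by
  rw [PySem.List.pyRange_one, PySem.List.pyRange_one, rungs]
  simp [List.zip_map', add_sub_cancel_left]

theorem rungs_shift (a h off : Int) :
    (rungs a h).map (fun p => (p.1 + off, p.2 + off)) = rungs (a + off) h := by
  rw [rungs, rungs, List.map_map]
  apply List.map_congr_left; intro k _; simp; constructor <;> ring

-- recursive denotation of one non-ready stack entry
def hcS (n offset : Int) : List (Int × Int) :=
  if n ≤ 0 then []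
  else
    hcS (n - 1) offset ++ hcS (n - 1) (offset + 2 ^ (n - 1).toNat)
      ++ rungs offset (2 ^ (n - 1).toNat)
termination_by n.toNat
decreasing_by all_goals omega

-- denotation of a stack entry: the edges its processing eventually emits
def evalE (e : Int × Int × Bool) : List (Int × Int) :=
  match e with
  | (n, off, r) =>
    if n ≤ 0 then []
    else if r then rungs off (2 ^ (n - 1).toNat) else hcS n off

theorem hcS_nonpos {n : Int} (off : Int) (h : n ≤ 0) : hcS n off = [] := by
  rw [hcS]; simp [h]

theorem hcS_pos {n : Int} (off : Int) (h : ¬ n ≤ 0) :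
    hcS n off = hcS (n - 1) off ++ hcS (n - 1) (off + 2 ^ (n - 1).toNat)
      ++ rungs off (2 ^ (n - 1).toNat) := by
  conv_lhs => rw [hcS]
  simp [h]

theorem evalE_false (m off : Int) : evalE (m, off, false) = hcS m off := by
  rw [evalE]
  by_cases h : m ≤ 0
  · rw [hcS_nonpos off h]; simp [h]
  · simp [h]

theorem evalE_true {m : Int} (off : Int) (h : ¬ m ≤ 0) :
    evalE (m, off, true) = rungs off (2 ^ (m - 1).toNat) := by
  rw [evalE]; simp [h]

-- the loop invariant: hcLoop appends, after 'edges', the denotations of the stack in order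
theorem hcLoop_eq (N : Nat) : ∀ (stack : List (Int × Int × Bool)) (edges : List (Int × Int)),
    (stack.map hcW).sum ≤ N →
    hcLoop stack edges = edges ++ (stack.map evalE).flatten := by
  induction N with
  | zero =>
    intro stack edges hs
    cases stack with
    | nil => simp [hcLoop]
    | cons e rest =>
      exfalso
      have := hcW_pos e
      simp only [List.map_cons, List.sum_cons] at hs
      omega
  | succ N ih =>
    intro stack edges hs
    cases stack with
    | nil => simp [hcLoop]
    | cons e rest =>
      rcases e with ⟨n, offset, ready⟩
      simp only [List.map_cons, List.sum_cons] at hs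
      have h1 : 1 ≤ 2 ^ n.toNat := Nat.one_le_two_pow
      by_cases hn : n ≤ 0
      · rw [hcLoop]
        simp only [if_pos hn]
        rw [ih rest edges (by have := hcW_pos (n, offset, ready); omega)]
        simp [evalE, hn]
      · rw [hcLoop]
        simp only [if_neg hn]
        by_cases hr : ready
        · simp only [dif_pos hr]
          rw [ih rest _ (by simp only [hcW, if_pos hr] at hs; omega),
              zip_pyRange_eq_rungs offset (2 ^ (n - 1).toNat)]
          simp [evalE, hn, hr, List.append_assoc]
        · simp only [dif_neg hr]
          rw [Bool.not_eq_true] at hr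
          subst hr
          have hwn : hcW (n, offset, false) = 3 * 2 ^ n.toNat - 2 := by
            simp [hcW]
          have hpow : 2 ^ n.toNat = 2 * 2 ^ (n - 1).toNat := by
            have hn' : n.toNat = (n - 1).toNat + 1 := by omega
            rw [hn', pow_succ]; ring
          have h1' : 1 ≤ 2 ^ (n - 1).toNat := Nat.one_le_two_pow
          rw [hwn] at hs
          have hsum :
              (((n - 1, offset, false) :: (n - 1, offset + 2 ^ (n - 1).toNat, false)
                  :: (n, offset, true) :: rest).map hcW).sum ≤ N := by
            simp only [List.map_cons, List.sum_cons, hcW]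
            norm_num
            have hEq : n.toNat - 1 = (n - 1).toNat := by omega
            rw [hEq]
            omega
          rw [ih _ edges hsum]
          simp only [List.map_cons, List.flatten_cons, evalE_false,
            evalE_true offset hn]
          rw [hcS_pos offset hn]
          simp [List.append_assoc]

-- emitting at an offset is the offset-0 emission with both endpoints shifted
theorem hcS_shift (k : Nat) : ∀ (n offset : Int), n.toNat = k →
    hcS n offset = (hcS n 0).map (fun p => (p.1 + offset, p.2 + offset)) := by
  induction k with
  | zero =>
    intro n offset hk
    have hn : n ≤ 0 := by omega
    rw [hcS_nonpos offset hn, hcS_nonpos 0 hn]; simp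
  | succ m ih =>
    intro n offset hk
    have hn : ¬ n ≤ 0 := by omega
    rw [hcS_pos offset hn, hcS_pos 0 hn]
    simp only [List.map_append]
    rw [ih (n - 1) offset (by omega),
        ih (n - 1) (offset + 2 ^ (n - 1).toNat) (by omega),
        ih (n - 1) (0 + 2 ^ (n - 1).toNat) (by omega),
        rungs_shift]
    simp only [List.map_map, zero_add]
    congr 1
    congr 1
    apply List.map_congr_left; intro p _; simp; constructor <;> ring

-- A's rung comprehension is the same block
theorem pyRange_map_eq_rungs (v : Int) :
    (PySem.List.pyRange 0 v 1).map (fun i => (i, i + v)) = rungs 0 v := by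
  rw [PySem.List.pyRange_one, rungs, List.map_map]
  simp only [Int.sub_zero]
  apply List.map_congr_left; intro k _; simp [add_comm]

-- A's foldl satisfies the doubling recurrence of hcS
theorem hypercube_eq_hcS (k : Nat) : ∀ (d : Int), d.toNat = k →
    hypercube d = hcS d 0 := by
  induction k with
  | zero =>
    intro d hk
    have hd : d ≤ 0 := by omega
    rw [hypercube, PySem.List.pyRange_one_eq_nil hd, hcS_nonpos 0 hd]
    simp
  | succ m ih =>
    intro d hk
    have hd : ¬ d ≤ 0 := by omega
    have hsplit : PySem.List.pyRange 0 d 1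
        = PySem.List.pyRange 0 (d - 1) 1 ++ [d - 1] := by
      have := PySem.List.pyRange_one_succ_right (a := 0) (b := d - 1) (by omega)
      simpa using this
    rw [hypercube, hsplit, List.foldl_append]
    simp only [List.foldl_cons, List.foldl_nil]
    rw [← hypercube, ih (d - 1) (by omega), pyRange_map_eq_rungs]
    rw [hcS_pos 0 hd,
        hcS_shift m (d - 1) (0 + 2 ^ (d - 1).toNat) (by omega)]
    simp only [List.append_assoc, zero_add]

-- ===== VERDICT (by name: the statement is the Claim_ definition above) =====
theorem hypercube_spec : Claim_equal_hypercube := by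
  intro d _
  show hypercube d = hypercube_alt d
  rw [hypercube_alt,
      hcLoop_eq ((([(d, 0, false)]).map hcW).sum) [(d, 0, false)] [] (le_refl _)]
  simp only [List.map_cons, List.map_nil, List.flatten_cons, List.flatten_nil,
    List.append_nil, List.nil_append, evalE_false]
  exact hypercube_eq_hcS d.toNat d rfl
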